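-- pv_equiv track=rewrite | github.com/0aax/jianpu | tests/test1.py | gen_barred_notes
-- ===== SOURCE A (Python) =====
-- types_bars = {'bar', 'lrep', 'rrep'}
--
-- def gen_barred_notes(notes):
--     barred_notes = []
--     curr_bar = []
--     for n in notes:
--         if n[0] in types_bars:
--             barred_notes.append(curr_bar)
--             curr_bar = []
--         else: curr_bar.append(n)
--     if len(curr_bar) != 0: barred_notes.append(curr_bar)
--     return barred_notes
-- ===== SOURCE B (Python) =====
-- types_bars = {'bar', 'lrep', 'rrep'}
--
-- def gen_barred_notes(notes):
--     positions = [i for i, n in enumerate(notes) if n[0] in types_bars]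
--     res = []
--     prev = -1
--     for pos in positions:
--         res.append(notes[prev + 1:pos])
--         prev = pos
--     trailing = notes[prev + 1:]
--     if trailing:
--         res.append(trailing)
--     return res
-- ===== Notes on version B (the rewrite author's own statement) =====
-- stated objective: alternative
-- what changed: B precomputes the list of bar-marker indices and builds each bar by slicing the input between consecutive markers (dropping only a trailing empty slice), instead of accumulating a current bar element by element.
import Mathlib
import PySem

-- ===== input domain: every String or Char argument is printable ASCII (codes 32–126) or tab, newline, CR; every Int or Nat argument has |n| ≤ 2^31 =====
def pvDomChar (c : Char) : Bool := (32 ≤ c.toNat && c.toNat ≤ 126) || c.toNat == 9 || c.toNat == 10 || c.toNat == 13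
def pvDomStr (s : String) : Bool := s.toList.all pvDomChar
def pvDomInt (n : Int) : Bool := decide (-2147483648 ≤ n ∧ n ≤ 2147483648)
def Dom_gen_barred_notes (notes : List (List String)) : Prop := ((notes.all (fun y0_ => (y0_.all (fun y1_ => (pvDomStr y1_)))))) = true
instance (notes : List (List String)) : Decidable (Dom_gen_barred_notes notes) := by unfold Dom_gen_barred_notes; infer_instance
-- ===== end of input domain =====

-- B re-implements the grouping by slicing the input between precomputed bar-marker
-- positions instead of accumulating a current bar element by element (objective: alternative).

-- ===== PORT A =====
-- n[0] in types_bars  (n[0] raises IndexError on an empty tuple: none ↦ false, excluded by Pre_)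
def pvIsBar (n : List String) : Bool :=
  match PySem.List.pyGet? n 0 with
  | some h => (h == "bar" || h == "lrep" || h == "rrep")
  | none => false

def gen_barred_notes (notes : List (List String)) : List (List (List String)) :=
  let st := notes.foldl
    (fun (st : List (List (List String)) × List (List String)) n =>
      if pvIsBar n then (st.1 ++ [st.2], []) else (st.1, st.2 ++ [n]))
    ([], [])
  if st.2.length ≠ 0 then st.1 ++ [st.2] else st.1

-- ===== PORT B =====
def gen_barred_notes_alt (notes : List (List String)) : List (List (List String)) :=
  let positions : List Int :=
    ((PySem.List.enumerate notes 0).filter (fun p => pvIsBar p.2)).map Prod.fst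
  let st := positions.foldl
    (fun (st : List (List (List String)) × Int) pos =>
      (st.1 ++ [PySem.List.slice notes (some (st.2 + 1)) (some pos)], pos))
    ([], -1)
  let trailing := PySem.List.slice notes (some (st.2 + 1)) none
  if trailing ≠ [] then st.1 ++ [trailing] else st.1

-- ===== PRECONDITION & SPEC =====
-- Pre_ excludes inputs containing an empty tuple: there n[0] raises IndexError in both A and B.
def Pre_gen_barred_notes (notes : List (List String)) : Prop := ∀ n ∈ notes, n ≠ []
instance (notes : List (List String)) : Decidable (Pre_gen_barred_notes notes) := by
  unfold Pre_gen_barred_notes; infer_instance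

def pvWitness_gen_barred_notes : List (List String) := [["c"], ["bar"], ["d"], ["rrep"]]

def Spec_gen_barred_notes (notes : List (List String)) (out : List (List (List String))) : Prop := out = gen_barred_notes_alt notes
instance (notes : List (List String)) (out : List (List (List String))) : Decidable (Spec_gen_barred_notes notes out) := by unfold Spec_gen_barred_notes; infer_instance

-- ===== CLAIM (what is proved, stated in full; the proofs are below) =====
def Claim_equal_gen_barred_notes : Prop := ∀ (notes : List (List String)), Dom_gen_barred_notes notes → Pre_gen_barred_notes notes → Spec_gen_barred_notes notes (gen_barred_notes notes)

-- ===== LEMMAS AND PROOFS =====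

-- Recursive characterisation of A's loop.
def pvBars : List (List String) → List (List String) → List (List (List String))
  | [], curr => if curr.length ≠ 0 then [curr] else []
  | n :: rest, curr => if pvIsBar n then curr :: pvBars rest [] else pvBars rest (curr ++ [n])

-- Named pieces of B's computation (definitionally those of the port).
def pvPosAux (xs : List (List String)) (s : Int) : List Int :=
  ((PySem.List.enumerate xs s).filter (fun p => pvIsBar p.2)).map Prod.fst

def pvSF (notes : List (List String)) (ps : List Int)
    (st : List (List (List String)) × Int) : List (List (List String)) × Int :=
  ps.foldl
    (fun (st : List (List (List String)) × Int) pos =>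
      (st.1 ++ [PySem.List.slice notes (some (st.2 + 1)) (some pos)], pos)) st

def pvAlt (notes : List (List String)) : List (List (List String)) :=
  if PySem.List.slice notes (some ((pvSF notes (pvPosAux notes 0) ([], -1)).2 + 1)) none ≠ [] then
    (pvSF notes (pvPosAux notes 0) ([], -1)).1 ++
      [PySem.List.slice notes (some ((pvSF notes (pvPosAux notes 0) ([], -1)).2 + 1)) none]
  else (pvSF notes (pvPosAux notes 0) ([], -1)).1

lemma pvAlt_eq (notes : List (List String)) : gen_barred_notes_alt notes = pvAlt notes := rfl

lemma pvA_fold (notes : List (List String)) : ∀ (acc : List (List (List String))) (curr : List (List String)),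
    (let st := notes.foldl
      (fun (st : List (List (List String)) × List (List String)) n =>
        if pvIsBar n then (st.1 ++ [st.2], []) else (st.1, st.2 ++ [n]))
      (acc, curr)
     if st.2.length ≠ 0 then st.1 ++ [st.2] else st.1) = acc ++ pvBars notes curr := by
  induction notes with
  | nil =>
    intro acc curr
    simp only [List.foldl_nil, pvBars]
    split_ifs <;> simp
  | cons n rest ih =>
    intro acc curr
    by_cases h : pvIsBar n
    · simpa [pvBars, h] using ih (acc ++ [curr]) []
    · simpa [pvBars, h] using ih acc (curr ++ [n])

lemma pvA_eq (notes : List (List String)) : gen_barred_notes notes = pvBars notes [] := by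
  have h := pvA_fold notes [] []
  simp only [List.nil_append] at h
  simpa [gen_barred_notes] using h

lemma pvBars_pre (rest : List (List String)) : ∀ (pre curr : List (List String)),
    pvBars rest (pre ++ curr) =
      (match pvBars rest curr with
       | [] => if pre = [] then [] else [pre]
       | g :: gs => (pre ++ g) :: gs) := by
  induction rest with
  | nil =>
    intro pre curr
    simp only [pvBars]
    rcases curr with _ | ⟨c, cs⟩
    · rcases pre with _ | ⟨p, ps⟩ <;> simp
    · rcases pre with _ | ⟨p, ps⟩ <;> simp
  | cons x r ih =>
    intro pre curr
    by_cases h : pvIsBar x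
    · simp [pvBars, h]
    · simp only [pvBars, h, Bool.false_eq_true, ite_false]
      have := ih pre (curr ++ [x])
      simpa [List.append_assoc] using this

lemma pvPosAux_cons (x : List String) (xs : List (List String)) (s : Int) :
    pvPosAux (x :: xs) s =
      if pvIsBar x then s :: pvPosAux xs (s + 1) else pvPosAux xs (s + 1) := by
  by_cases h : pvIsBar x <;> simp [pvPosAux, PySem.List.enumerate_cons, h]

lemma pvPosAux_shift (xs : List (List String)) : ∀ s : Int,
    pvPosAux xs (s + 1) = (pvPosAux xs s).map (· + 1) := by
  induction xs with
  | nil => intro s; simp [pvPosAux, PySem.List.enumerate_nil]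
  | cons x r ih =>
    intro s
    rw [pvPosAux_cons, pvPosAux_cons, ih s, ih (s + 1)]
    by_cases h : pvIsBar x <;> simp [h, ih]

lemma pvPosAux_nonneg (xs : List (List String)) : ∀ (s : Int), ∀ x ∈ pvPosAux xs s, s ≤ x := by
  induction xs with
  | nil => intro s x hx; simp [pvPosAux, PySem.List.enumerate_nil] at hx
  | cons a r ih =>
    intro s x hx
    rw [pvPosAux_cons] at hx
    by_cases h : pvIsBar a
    · simp [h] at hx
      rcases hx with rfl | hx
      · omega
      · have := ih (s + 1) x hx; omega
    · simp [h] at hx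
      have := ih (s + 1) x hx; omega

lemma pvSF_cons (notes : List (List String)) (pos : Int) (ps : List Int)
    (r : List (List (List String))) (p : Int) :
    pvSF notes (pos :: ps) (r, p) =
      pvSF notes ps (r ++ [PySem.List.slice notes (some (p + 1)) (some pos)], pos) := rfl

lemma pvSF_acc (notes : List (List String)) (ps : List Int) :
    ∀ (r r' : List (List (List String))) (p : Int),
    pvSF notes ps (r ++ r', p) = (r ++ (pvSF notes ps (r', p)).1, (pvSF notes ps (r', p)).2) := by
  induction ps with
  | nil => intro r r' p; simp [pvSF]
  | cons pos ps ih =>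
    intro r r' p
    simp only [pvSF, List.foldl_cons]
    have := ih r (r' ++ [PySem.List.slice notes (some (p + 1)) (some pos)]) pos
    simpa [pvSF, List.append_assoc] using this

lemma pvSF_acc' (notes : List (List String)) (ps : List Int)
    (r : List (List (List String))) (p : Int) :
    pvSF notes ps (r, p) = (r ++ (pvSF notes ps ([], p)).1, (pvSF notes ps ([], p)).2) := by
  have := pvSF_acc notes ps r [] p
  simpa using this

lemma pvSF_snd_ge (notes : List (List String)) (ps : List Int) :
    ∀ (r : List (List (List String))) (p : Int), -1 ≤ p → (∀ x ∈ ps, 0 ≤ x) →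
    -1 ≤ (pvSF notes ps (r, p)).2 := by
  induction ps with
  | nil => intro r p hp _; simpa [pvSF] using hp
  | cons pos ps ih =>
    intro r p hp hps
    have h0 : (0:Int) ≤ pos := hps pos (by simp)
    rw [pvSF_cons]
    exact ih _ pos (by omega) (fun x hx => hps x (by simp [hx]))

lemma pvSlice00 (xs : List (List String)) :
    PySem.List.slice xs none (some (0 : Int)) = [] := by
  rw [PySem.List.slice_to xs (by omega : (0:Int) ≤ 0)]; simp

lemma pvSlice0cons (n : List String) (rest : List (List String)) (pos : Int) (h : 0 ≤ pos) :
    PySem.List.slice (n :: rest) none (some (pos + 1)) =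
      n :: PySem.List.slice rest none (some pos) := by
  rw [PySem.List.slice_to _ (by omega : (0:Int) ≤ pos + 1), PySem.List.slice_to _ h]
  have h1 : (pos + 1).toNat = pos.toNat + 1 := by omega
  simp [h1]

lemma pvSlice_cons_shift (x : List String) (l : List (List String)) {a b : Int}
    (ha : 0 ≤ a) (hb : 0 ≤ b) :
    PySem.List.slice (x :: l) (some (a + 1)) (some (b + 1)) =
      PySem.List.slice l (some a) (some b) := by
  rw [PySem.List.slice_toNat _ (by omega) (by omega), PySem.List.slice_toNat _ ha hb]
  have h1 : (a + 1).toNat = a.toNat + 1 := by omega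
  have h2 : (b + 1).toNat = b.toNat + 1 := by omega
  simp [h1, h2]

lemma pvSlice_from_cons_shift (x : List String) (l : List (List String)) {a : Int} (ha : 0 ≤ a) :
    PySem.List.slice (x :: l) (some (a + 1)) none = PySem.List.slice l (some a) none := by
  rw [PySem.List.slice_from _ (by omega), PySem.List.slice_from _ ha]
  have h1 : (a + 1).toNat = a.toNat + 1 := by omega
  simp [h1]

lemma pvSF_shift (n : List String) (rest : List (List String)) (ps : List Int) :
    ∀ (r : List (List (List String))) (p : Int), -1 ≤ p → (∀ x ∈ ps, 0 ≤ x) →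
    pvSF (n :: rest) (ps.map (· + 1)) (r, p + 1) =
      ((pvSF rest ps (r, p)).1, (pvSF rest ps (r, p)).2 + 1) := by
  induction ps with
  | nil => intro r p _ _; simp [pvSF]
  | cons pos ps ih =>
    intro r p hp hps
    have h0 : (0:Int) ≤ pos := hps pos (by simp)
    simp only [List.map_cons]
    rw [pvSF_cons, pvSF_cons]
    rw [pvSlice_cons_shift n rest (a := p + 1) (b := pos) (by omega) h0]
    exact ih _ pos (by omega) (fun x hx => hps x (by simp [hx]))

lemma pvSF_shift' (n : List String) (rest : List (List String)) (ps : List Int)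
    (r : List (List (List String))) (q : Int) (hq : 0 ≤ q) (hps : ∀ x ∈ ps, 0 ≤ x) :
    pvSF (n :: rest) (ps.map (· + 1)) (r, q) =
      ((pvSF rest ps (r, q - 1)).1, (pvSF rest ps (r, q - 1)).2 + 1) := by
  have := pvSF_shift n rest ps r (q - 1) (by omega) hps
  rwa [show q - 1 + 1 = q by ring] at this

-- Core correspondence: B's slicing equals A's recursive grouping.
lemma pvAlt_eq_pvBars (notes : List (List String)) : pvAlt notes = pvBars notes [] := by
  induction notes with
  | nil => rfl
  | cons n rest ih =>
    have hnn : ∀ x ∈ pvPosAux rest 0, (0 : Int) ≤ x := pvPosAux_nonneg rest 0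
    by_cases h : pvIsBar n
    · -- marker head: first slice is empty, everything else shifts by one
      have hpos : pvPosAux (n :: rest) 0 = 0 :: (pvPosAux rest 0).map (· + 1) := by
        rw [pvPosAux_cons, if_pos h, pvPosAux_shift]
      have hst : pvSF (n :: rest) (pvPosAux (n :: rest) 0) ([], -1) =
          ([] :: (pvSF rest (pvPosAux rest 0) ([], -1)).1,
           (pvSF rest (pvPosAux rest 0) ([], -1)).2 + 1) := by
        rw [hpos, pvSF_cons]
        norm_num [pvSlice00]
        rw [pvSF_shift' n rest _ _ 0 (by omega) hnn]
        norm_num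
        rw [pvSF_acc']
        simp
      have hge : -1 ≤ (pvSF rest (pvPosAux rest 0) ([], -1)).2 :=
        pvSF_snd_ge rest _ _ _ (by omega) hnn
      unfold pvAlt
      rw [hst, pvSlice_from_cons_shift n rest (by omega : (0:Int) ≤ (pvSF rest (pvPosAux rest 0) ([], -1)).2 + 1)]
      simp only [pvBars, h, if_true]
      rw [← ih]
      unfold pvAlt
      split_ifs with ht <;> simp
    · -- non-marker head: n is prepended to the first group
      have hpos : pvPosAux (n :: rest) 0 = (pvPosAux rest 0).map (· + 1) := by
        rw [pvPosAux_cons, if_neg h, pvPosAux_shift]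
      have hbars : pvBars (n :: rest) [] =
          (match pvBars rest [] with
           | [] => [[n]]
           | g :: gs => (n :: g) :: gs) := by
        rw [show pvBars (n :: rest) [] = pvBars rest ([] ++ [n]) from by simp [pvBars, h],
            show ([] ++ [n] : List (List String)) = [n] ++ [] from by simp,
            pvBars_pre]
        rcases pvBars rest [] with _ | ⟨g, gs⟩ <;> simp
      rw [hbars, ← ih]
      rcases hP : pvPosAux rest 0 with _ | ⟨pos, P'⟩
      · -- no markers at all: one trailing group
        unfold pvAlt
        rw [hpos, hP]
        simp only [List.map_nil, pvSF, List.foldl_nil]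
        norm_num [PySem.List.slice_none_none]
        rcases rest with _ | ⟨r, rs⟩ <;> simp
      · have hpos0 : (0 : Int) ≤ pos := hnn pos (by rw [hP]; simp)
        have hP' : ∀ x ∈ P', (0 : Int) ≤ x := fun x hx => hnn x (by rw [hP]; simp [hx])
        have hge : -1 ≤ (pvSF rest P' ([], pos)).2 :=
          pvSF_snd_ge rest _ _ _ (by omega) hP'
        have hstL : pvSF (n :: rest) (pvPosAux (n :: rest) 0) ([], -1) =
            ((n :: PySem.List.slice rest none (some pos)) ::
              (pvSF rest P' ([], pos)).1,
             (pvSF rest P' ([], pos)).2 + 1) := by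
          rw [hpos, hP]
          simp only [List.map_cons]
          rw [pvSF_cons]
          norm_num [pvSlice0cons n rest pos hpos0]
          rw [pvSF_shift' n rest P' _ (pos + 1) (by omega) hP']
          norm_num
          rw [pvSF_acc']
          simp
        have hstR : pvSF rest (pvPosAux rest 0) ([], -1) =
            (PySem.List.slice rest none (some pos) ::
              (pvSF rest P' ([], pos)).1,
             (pvSF rest P' ([], pos)).2) := by
          rw [hP, pvSF_cons]
          norm_num
          rw [pvSF_acc']
          simp
        unfold pvAlt
        rw [hstL, hstR,
            pvSlice_from_cons_shift n rest (by omega : (0:Int) ≤ (pvSF rest P' ([], pos)).2 + 1)]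
        split_ifs with ht <;> simp

-- ===== VERDICT (by name: the statement is the Claim_ definition above) =====
theorem gen_barred_notes_spec : Claim_equal_gen_barred_notes := by
  intro notes _ _
  unfold Spec_gen_barred_notes
  rw [pvA_eq, pvAlt_eq, pvAlt_eq_pvBars]
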